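-- pv_equiv track=rewrite | github.com/FangYuLiu-SHU/PetitionDataVisualizationPlatform | algorithm/request_extract.py | dangerous_degree_classification
-- ===== SOURCE A (Python) =====
-- def dangerous_degree_classification(content_text, dangerous_word):
--     flag = 1
--     for index in range(3, -1, -1):
--         for word in dangerous_word[index]:
--             if word in content_text:
--                 flag = index
--                 return flag + 1
--     return flag
-- ===== SOURCE B (Python) =====
-- def dangerous_degree_classification(content_text, dangerous_word):
--     # Index the text once: the set of all its substrings up to the longest
--     # pattern length; every 'word in text' test becomes one set lookup.
--     m = min(max((len(w) for level in dangerous_word[:4] for w in level),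
--                 default=0),
--             len(content_text))
--     subs = {content_text[i:i + k]
--             for i in range(len(content_text) + 1)
--             for k in range(m + 1)}
--     flag = 1
--     for index in range(4):
--         if any(w in subs for w in dangerous_word[index]):
--             flag = index + 1
--     return flag
-- ===== Notes on version B (the rewrite author's own statement) =====
-- stated objective: alternative
-- what changed: Instead of scanning the text for each word level by level with early return, B builds a substring index once (the set of all substrings of the text up to the longest pattern length) and decides every level by set lookups, accumulating the highest matching level in an ascending pass.
import Mathlib
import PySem

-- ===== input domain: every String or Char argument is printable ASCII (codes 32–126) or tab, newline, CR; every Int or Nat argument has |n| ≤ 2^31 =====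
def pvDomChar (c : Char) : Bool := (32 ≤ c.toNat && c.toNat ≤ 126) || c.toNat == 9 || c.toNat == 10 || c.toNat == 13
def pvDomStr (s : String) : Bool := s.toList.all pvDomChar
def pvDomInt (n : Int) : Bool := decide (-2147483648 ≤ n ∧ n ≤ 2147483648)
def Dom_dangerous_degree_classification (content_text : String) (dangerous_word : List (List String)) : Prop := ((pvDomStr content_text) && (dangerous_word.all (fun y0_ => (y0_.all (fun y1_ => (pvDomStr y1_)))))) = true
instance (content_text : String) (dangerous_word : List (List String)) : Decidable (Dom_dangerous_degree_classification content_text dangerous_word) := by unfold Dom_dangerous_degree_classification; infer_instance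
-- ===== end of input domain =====

-- B replaces A's per-word substring scans of the text by a substring index: it builds, once,
-- the set of all substrings of the text up to the longest pattern length, and decides each
-- level by set lookups; objective: alternative (a different data structure, not claimed faster).

-- ===== PORT A =====
-- inner 'for word in …: if word in content_text: return index+1' — early return on first hit
def pvAInner (content_text : String) : List String → Bool
  | [] => false
  | w :: ws => if PySem.Str.isIn w content_text then true else pvAInner content_text ws

-- outer 'for index in range(3, -1, -1)' with early return; dangerous_word[index] with index in
-- 0..3 raises IndexError when len < 4 — excluded by Pre_, so pyGetD's default is never used.
def pvAOuter (content_text : String) (dangerous_word : List (List String)) : List Int → Int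
  | [] => 1
  | i :: rest =>
      if pvAInner content_text (PySem.List.pyGetD dangerous_word i []) then i + 1
      else pvAOuter content_text dangerous_word rest

def dangerous_degree_classification (content_text : String) (dangerous_word : List (List String)) : Int :=
  pvAOuter content_text dangerous_word (PySem.List.pyRange 3 (-1) (-1))

-- ===== PORT B =====
-- lengths of all words in dangerous_word[:4]  (the generator in Source B's max(...))
def pvLens (dangerous_word : List (List String)) : List Int :=
  (PySem.List.slice dangerous_word none (some 4)).flatMap (fun level => level.map (fun w => PySem.Str.len w))

-- {content_text[i:i+k] for i in range(len+1) for k in range(m+1)}  as the list the set is built from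
def pvSubs (content_text : String) (m : Int) : List String :=
  (PySem.List.pyRange 0 (PySem.Str.len content_text + 1)).flatMap (fun i =>
    (PySem.List.pyRange 0 (m + 1)).map (fun k => PySem.Str.slice content_text (some i) (some (i + k))))

def dangerous_degree_classification_alt (content_text : String) (dangerous_word : List (List String)) : Int :=
  let m : Int := min (PySem.List.maxD (pvLens dangerous_word) (fun x => x) 0) (PySem.Str.len content_text)
  let subs : PySem.Set String := PySem.Set.ofList (pvSubs content_text m)
  (PySem.List.pyRange 0 4).foldl
    (fun flag index =>
      if (PySem.List.pyGetD dangerous_word index []).any (fun w => PySem.Set.contains subs w)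
      then index + 1 else flag)
    1

-- ===== PRECONDITION & SPEC =====
-- Pre_ excludes lists with fewer than 4 sublists, on which A (and B) raise IndexError at dangerous_word[3].
def Pre_dangerous_degree_classification (content_text : String) (dangerous_word : List (List String)) : Prop :=
  4 ≤ dangerous_word.length
instance (content_text : String) (dangerous_word : List (List String)) : Decidable (Pre_dangerous_degree_classification content_text dangerous_word) := by unfold Pre_dangerous_degree_classification; infer_instance
def pvWitness_dangerous_degree_classification : String × List (List String) := ("ab", [["x"], [], ["a"], ["zz"]])

def Spec_dangerous_degree_classification (content_text : String) (dangerous_word : List (List String)) (out : Int) : Prop := out = dangerous_degree_classification_alt content_text dangerous_word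
instance (content_text : String) (dangerous_word : List (List String)) (out : Int) : Decidable (Spec_dangerous_degree_classification content_text dangerous_word out) := by unfold Spec_dangerous_degree_classification; infer_instance

-- ===== CLAIM (what is proved, stated in full; the proofs are below) =====
def Claim_equal_dangerous_degree_classification : Prop := ∀ (content_text : String) (dangerous_word : List (List String)), Dom_dangerous_degree_classification content_text dangerous_word → Pre_dangerous_degree_classification content_text dangerous_word → Spec_dangerous_degree_classification content_text dangerous_word (dangerous_degree_classification content_text dangerous_word)

-- ===== LEMMAS AND PROOFS =====

-- A's inner early-return loop returns exactly 'any word matches'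
theorem pvAInner_eq_any (t : String) (ws : List String) :
    pvAInner t ws = ws.any (fun w => PySem.Str.isIn w t) := by
  induction ws with
  | nil => rfl
  | cons w ws ih => simp [pvAInner, ih]

-- every string in the substring index really occurs in the text
theorem pv_mem_subs_isIn (t w : String) (m : Int) (h : w ∈ pvSubs t m) :
    PySem.Str.isIn w t = true := by
  unfold pvSubs at h
  simp only [List.mem_flatMap, List.mem_map, PySem.List.mem_pyRange_one] at h
  obtain ⟨i, ⟨hi0, _⟩, k, ⟨hk0, _⟩, rfl⟩ := h
  obtain ⟨a, rfl⟩ := Int.eq_ofNat_of_zero_le hi0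
  obtain ⟨b, rfl⟩ := Int.eq_ofNat_of_zero_le hk0
  rw [PySem.Str.isIn_iff_infix, PySem.Str.toList_slice, PySem.Chars.slice_eq_listSlice,
    PySem.List.slice_natCast_add]
  exact ((t.toList.drop a).take_prefix b).isInfix.trans (t.toList.drop_suffix a).isInfix

-- every substring of the text no longer than m is in the index
theorem pv_isIn_mem_subs (t w : String) (m : Int)
    (hw : PySem.Str.isIn w t = true) (hlen : PySem.Str.len w ≤ m) :
    w ∈ pvSubs t m := by
  rw [PySem.Str.isIn_iff_infix] at hw
  obtain ⟨p, s, h⟩ := hw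
  unfold pvSubs
  simp only [List.mem_flatMap, List.mem_map, PySem.List.mem_pyRange_one]
  have hlt : p.length + w.toList.length + s.length = t.toList.length := by
    rw [← h]; simp [List.length_append]; omega
  rw [PySem.Str.len_eq] at hlen
  refine ⟨(p.length : Int), ⟨by positivity, by rw [PySem.Str.len_eq]; omega⟩,
    (w.toList.length : Int), ⟨by positivity, by omega⟩, ?_⟩
  apply String.toList_inj.mp
  rw [PySem.Str.toList_slice, PySem.Chars.slice_eq_listSlice, PySem.List.slice_natCast_add, ← h]
  rw [List.append_assoc, List.drop_left, List.take_left]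

-- set lookup in the index = Python's 'word in text', for words counted in pvLens
theorem pv_contains_eq (t : String) (dw : List (List String)) (w : String)
    (hmem : PySem.Str.len w ∈ pvLens dw) :
    PySem.Set.contains
      (PySem.Set.ofList (pvSubs t (min (PySem.List.maxD (pvLens dw) (fun x => x) 0) (PySem.Str.len t)))) w
      = PySem.Str.isIn w t := by
  have hc : ∀ (L : List String) (x : String), PySem.Set.contains (PySem.Set.ofList L) x = decide (x ∈ L) := by
    intro L x
    simp [PySem.Set.contains, List.contains_eq_mem, PySem.Set.mem_ofList]
  rw [hc]
  cases hin : PySem.Str.isIn w t with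
  | true =>
      simp only [decide_eq_true_eq]
      apply pv_isIn_mem_subs t w _ hin
      have h1 : PySem.Str.len w ≤ PySem.List.maxD (pvLens dw) (fun x => x) 0 :=
        PySem.List.le_maxD_id _ _ _ hmem
      have h2 : PySem.Str.len w ≤ PySem.Str.len t := by
        rw [PySem.Str.len_eq, PySem.Str.len_eq]
        exact_mod_cast ((PySem.Str.isIn_iff_infix w t).mp hin).length_le
      exact le_min h1 h2
  | false =>
      simp only [decide_eq_false_iff_not]
      intro hmem'
      rw [pv_mem_subs_isIn t w _ hmem'] at hin
      simp at hin

-- words of level idx (idx < 4, list long enough) are counted in pvLens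
theorem pv_len_mem_lens (dw : List (List String)) (idx : Nat) (hidx : idx < 4)
    (h4 : 4 ≤ dw.length) (w : String) (hw : w ∈ dw.getD idx []) :
    PySem.Str.len w ∈ pvLens dw := by
  unfold pvLens
  rw [PySem.List.slice_to dw (by norm_num)]
  simp only [List.mem_flatMap, List.mem_map]
  refine ⟨dw.getD idx [], ?_, w, hw, rfl⟩
  rw [List.getD_eq_getElem dw [] (by omega)]
  have : (dw.take (Int.toNat 4))[idx]'(by simp; omega) = dw[idx]'(by omega) := List.getElem_take
  exact this ▸ List.getElem_mem _

-- each level's test in B equals the plain 'any word in text' test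
theorem pv_any_eq (t : String) (dw : List (List String)) (idx : Nat) (hidx : idx < 4)
    (h4 : 4 ≤ dw.length) :
    ((dw.getD idx []).any (fun w => PySem.Set.contains
        (PySem.Set.ofList (pvSubs t (min (PySem.List.maxD (pvLens dw) (fun x => x) 0) (PySem.Str.len t)))) w))
      = (dw.getD idx []).any (fun w => PySem.Str.isIn w t) :=
  PySem.List.any_congr_mem (fun w hw => pv_contains_eq t dw w (pv_len_mem_lens dw idx hidx h4 w hw))

-- ===== VERDICT (by name: the statement is the Claim_ definition above) =====
theorem dangerous_degree_classification_spec : Claim_equal_dangerous_degree_classification := by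
  intro t dw _ hpre
  show dangerous_degree_classification t dw = dangerous_degree_classification_alt t dw
  simp only [dangerous_degree_classification, dangerous_degree_classification_alt]
  have hr3 : PySem.List.pyRange 3 (-1) (-1) = [3, 2, 1, 0] := by decide
  have hr4 : PySem.List.pyRange 0 4 = [0, 1, 2, 3] := by decide
  rw [hr3, hr4]
  simp only [pvAOuter, pvAInner_eq_any, List.foldl]
  have hg : ∀ k : Nat, k < 4 → PySem.List.pyGetD dw (OfNat.ofNat k) [] = dw.getD k [] :=
    fun k _ => PySem.List.pyGetD_ofNat' dw k []
  rw [hg 0 (by omega), hg 1 (by omega), hg 2 (by omega), hg 3 (by omega)]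
  rw [pv_any_eq t dw 0 (by omega) hpre, pv_any_eq t dw 1 (by omega) hpre,
    pv_any_eq t dw 2 (by omega) hpre, pv_any_eq t dw 3 (by omega) hpre]
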